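-- pv_equiv track=rewrite | github.com/AndrewShepherd/leetcode-python | palindrome-pairs/palindrome_pairs.py | getPrefixBeforePalindromes
-- ===== SOURCE A (Python) =====
-- def isPalindrome(compressedWord, start, endExclusive):
--     l = start
--     r = endExclusive - 1
--     while l < r:
--         if compressedWord[l] != compressedWord[r]:
--             return False
--         l += 1
--         r -= 1
--     return True
--
-- def getPrefixBeforePalindromes(compressedWord):
--     for index, pivotWord in enumerate(compressedWord):
--         char, count = pivotWord
--         lastChar, lastCount = compressedWord[-1]
--         if char != lastChar or count < lastCount:
--             continue
--         if index == len(compressedWord) - 1: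
--             yield compressedWord[:index]
--             for c in range(1, count):
--                 yield compressedWord[:-1] + ((char, c),)
--         else:
--             if not isPalindrome(compressedWord, index+1, len(compressedWord)-1):
--                 continue
--             if count == lastCount:
--                 yield compressedWord[:index]
--             else:
--                 yield compressedWord[:index] + ((char, count-lastCount),)
-- ===== SOURCE B (Python) =====
-- def getPrefixBeforePalindromes(compressedWord):
--     words = compressedWord
--     n = len(words)
--     if n == 0:
--         return
--     lastChar, lastCount = words[-1]
--     m = n - 1
--     t = words[:m]
--     # Encode each word by the index of its first occurrence in t: equal words get
--     # equal digits, distinct words distinct digits, every digit < base = m + 1.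
--     base = m + 1
--     code = [t.index(w) for w in t]
--     pows = [1]
--     for _ in range(m):
--         pows.append(pows[-1] * base)
--     # Exact "rolling hash" suffix sums over the digit list (no modulus, so no
--     # collisions): S[a] = sum(code[k]*base**k for k in [a,m)),
--     # R[a] = sum(code[k]*base**(m-1-k) for k in [a,m)).
--     # t[a:] is a palindrome  iff  S[a] == R[a] * base**a.
--     S = [0] * (m + 1)
--     R = [0] * (m + 1)
--     for a in range(m - 1, -1, -1):
--         S[a] = S[a + 1] + code[a] * pows[a]
--         R[a] = R[a + 1] + code[a] * pows[m - 1 - a]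
--     for index in range(m):
--         char, count = words[index]
--         if char == lastChar and count >= lastCount:
--             if S[index + 1] == R[index + 1] * pows[index + 1]:
--                 if count == lastCount:
--                     yield t[:index]
--                 else:
--                     yield t[:index] + ((char, count - lastCount),)
--     yield t
--     for c in range(1, lastCount):
--         yield t + ((lastChar, c),)
-- ===== Notes on version B (the rewrite author's own statement) =====
-- stated objective: alternative
-- what changed: B replaces A's per-index two-pointer palindrome scan of the middle segment by a precomputed exact rolling hash: words are encoded as digits (first-occurrence index, base larger than the alphabet, hence collision-free) and two suffix sums S/R plus a power table answer every palindrome query with a single arithmetic comparison.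
import Mathlib
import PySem

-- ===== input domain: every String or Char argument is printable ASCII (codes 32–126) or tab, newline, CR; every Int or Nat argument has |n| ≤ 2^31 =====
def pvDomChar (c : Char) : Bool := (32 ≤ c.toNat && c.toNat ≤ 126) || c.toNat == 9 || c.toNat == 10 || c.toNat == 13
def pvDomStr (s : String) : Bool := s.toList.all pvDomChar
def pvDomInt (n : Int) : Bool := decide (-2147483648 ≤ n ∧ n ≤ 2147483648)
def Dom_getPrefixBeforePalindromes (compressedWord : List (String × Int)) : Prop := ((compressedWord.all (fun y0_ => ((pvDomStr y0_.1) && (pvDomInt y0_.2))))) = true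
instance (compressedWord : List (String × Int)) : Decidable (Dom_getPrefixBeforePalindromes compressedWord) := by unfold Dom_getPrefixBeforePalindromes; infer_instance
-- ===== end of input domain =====

-- B replaces A's per-index two-pointer palindrome scans by a precomputed exact rolling hash:
-- words are encoded as digits (first-occurrence index, base > alphabet, so collision-free) and
-- two suffix sums answer every "is the middle segment a palindrome" query with one arithmetic
-- comparison (alternative algorithm; exactness proved via base-representation uniqueness).


-- ===== PORT A =====
-- the 'while l < r' loop of isPalindrome; comparing the pyGet? Options is exact on the
-- in-range calls A makes (none never arises there)
def palLoopA (w : List (String × Int)) (l r : Int) : Bool :=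
  if l < r then
    if PySem.List.pyGet? w l ≠ PySem.List.pyGet? w r then false
    else palLoopA w (l + 1) (r - 1)
  else true
termination_by (r - l).toNat
decreasing_by omega

def isPalindromeA (w : List (String × Int)) (start endExclusive : Int) : Bool :=
  palLoopA w start (endExclusive - 1)

-- one iteration of A's generator loop (the yields it produces; 'continue' = no yield)
def bodyA (w : List (String × Int)) (index : Int) (pivot : String × Int) : List (List (String × Int)) :=
  let char := pivot.1
  let count := pivot.2
  match PySem.List.pyGet? w (-1) with
  | none => []
  | some last =>
    let lastChar := last.1
    let lastCount := last.2
    if char ≠ lastChar ∨ count < lastCount then []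
    else if index = (w.length : Int) - 1 then
      [PySem.List.slice w none (some index)] ++
        (PySem.List.pyRange 1 count 1).map
          (fun c => PySem.List.slice w none (some (-1)) ++ [(char, c)])
    else if ¬ (isPalindromeA w (index + 1) ((w.length : Int) - 1) = true) then []
    else if count = lastCount then [PySem.List.slice w none (some index)]
    else [PySem.List.slice w none (some index) ++ [(char, count - lastCount)]]

def getPrefixBeforePalindromes (compressedWord : List (String × Int)) : List (List (String × Int)) :=
  (PySem.List.enumerate compressedWord).foldl
    (fun acc p => acc ++ bodyA compressedWord p.1 p.2) []

-- ===== PORT B =====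
-- pows = [1]; for _ in range(m): pows.append(pows[-1] * base)
def powsB (base : Int) : Nat → List Int
  | 0 => [1]
  | k + 1 =>
    let p := powsB base k
    p ++ [p.getLastD 1 * base]

-- the backward array fill 'S[a] = S[a+1] + code[a]*pows[a]' as the same recurrence
def sValB (code pows : List Int) (m a : Nat) : Int :=
  if a < m then sValB code pows m (a + 1) + code.getD a 0 * pows.getD a 0 else 0
termination_by m - a

-- 'R[a] = R[a+1] + code[a]*pows[m-1-a]'
def rValB (code pows : List Int) (m a : Nat) : Int :=
  if a < m then rValB code pows m (a + 1) + code.getD a 0 * pows.getD (m - 1 - a) 0 else 0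
termination_by m - a

def getPrefixBeforePalindromes_alt (compressedWord : List (String × Int)) : List (List (String × Int)) :=
  let words := compressedWord
  let n : Int := words.length
  if n = 0 then []
  else
    match PySem.List.pyGet? words (-1) with
    | none => []
    | some last =>
      let lastChar := last.1
      let lastCount := last.2
      let m : Nat := words.length - 1
      let t := PySem.List.slice words none (some (m : Int))
      let base : Int := (m : Int) + 1
      let code : List Int := t.map (fun w => (((PySem.List.index? t w).getD 0 : Nat) : Int))
      let pows := powsB base m
      ((PySem.List.pyRange 0 (m : Int) 1).foldl
        (fun acc index =>
          let word := PySem.List.pyGetD words index ("", 0)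
          let char := word.1
          let count := word.2
          if char = lastChar ∧ count ≥ lastCount then
            if sValB code pows m (index.toNat + 1)
                = rValB code pows m (index.toNat + 1) * pows.getD (index.toNat + 1) 0 then
              if count = lastCount then acc ++ [PySem.List.slice t none (some index)]
              else acc ++ [PySem.List.slice t none (some index) ++ [(char, count - lastCount)]]
            else acc
          else acc) [])
      ++ [t]
      ++ (PySem.List.pyRange 1 lastCount 1).map (fun c => t ++ [(lastChar, c)])

-- ===== PRECONDITION & SPEC =====
def Spec_getPrefixBeforePalindromes (compressedWord : List (String × Int)) (out : List (List (String × Int))) : Prop := out = getPrefixBeforePalindromes_alt compressedWord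
instance (compressedWord : List (String × Int)) (out : List (List (String × Int))) : Decidable (Spec_getPrefixBeforePalindromes compressedWord out) := by unfold Spec_getPrefixBeforePalindromes; infer_instance

-- ===== CLAIM (what is proved, stated in full; the proofs are below) =====
def Claim_equal_getPrefixBeforePalindromes : Prop := ∀ (compressedWord : List (String × Int)), Dom_getPrefixBeforePalindromes compressedWord → Spec_getPrefixBeforePalindromes compressedWord (getPrefixBeforePalindromes compressedWord)

-- ===== LEMMAS AND PROOFS =====
theorem seg_decomp {α : Type} (w : List α) (a b : Nat) (hab : a < b) (hb : b < w.length) :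
    (w.drop a).take (b + 1 - a) =
      w[a]'(by omega) :: (((w.drop (a + 1)).take (b - 1 - a)) ++ [w[b]'hb]) := by
  rw [show w.drop a = w[a]'(by omega) :: w.drop (a + 1) from
    (List.getElem_cons_drop (as := w) (h := by omega)).symm]
  have h1 : b + 1 - a = (b - a) + 1 := by omega
  rw [h1, List.take_succ_cons]
  congr 1
  have h2 : b - a = (b - 1 - a) + 1 := by omega
  rw [h2, List.take_add_one]
  congr 1
  rw [List.getElem?_drop]
  have h3 : a + 1 + (b - 1 - a) = b := by omega
  rw [h3, List.getElem?_eq_getElem hb]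
  rfl

theorem pal_cons_concat {α : Type} (x y : α) (m : List α) :
    ((x :: (m ++ [y])).reverse = x :: (m ++ [y])) ↔ (x = y ∧ m.reverse = m) := by
  rw [List.reverse_cons, List.reverse_append]
  simp only [List.reverse_cons, List.reverse_nil, List.nil_append, List.cons_append,
    List.cons.injEq]
  constructor
  · rintro ⟨rfl, h⟩
    exact ⟨rfl, by simpa using congrArg List.reverse h.symm⟩
  · rintro ⟨rfl, h⟩
    exact ⟨rfl, by simp [h]⟩

theorem pal_correct_aux (w : List (String × Int)) :
    ∀ (m : Nat) (l r : Int), (r - l).toNat ≤ m → 0 ≤ l → r < (w.length : Int) →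
      (palLoopA w l r = true ↔
        ((w.drop l.toNat).take (r + 1 - l).toNat).reverse
          = (w.drop l.toNat).take (r + 1 - l).toNat) := by
  intro m
  induction m with
  | zero =>
    intro l r hm hl hr
    rw [palLoopA]
    have hlr : ¬ l < r := by omega
    simp only [hlr, if_false]
    have h1 : (r + 1 - l).toNat ≤ 1 := by omega
    rcases Nat.le_one_iff_eq_zero_or_eq_one.mp h1 with h | h <;> rw [h]
    · simp
    · cases hd : w.drop l.toNat <;> simp
  | succ m ih =>
    intro l r hm hl hr
    by_cases hlr : l < r
    · rw [palLoopA]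
      simp only [hlr, if_true]
      have ha : l.toNat < r.toNat := by omega
      have hb : r.toNat < w.length := by omega
      have hga : PySem.List.pyGet? w l = some (w[l.toNat]'(by omega)) :=
        PySem.List.pyGet?_eq_some_getElem w hl (by omega)
      have hgb : PySem.List.pyGet? w r = some (w[r.toNat]'hb) :=
        PySem.List.pyGet?_eq_some_getElem w (by omega) hr
      have hseg : (w.drop l.toNat).take (r + 1 - l).toNat =
          (w[l.toNat]'(by omega)) ::
            (((w.drop (l.toNat + 1)).take (r.toNat - 1 - l.toNat)) ++ [w[r.toNat]'hb]) := by
        have := seg_decomp w l.toNat r.toNat ha hb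
        rw [show (r + 1 - l).toNat = r.toNat + 1 - l.toNat by omega]
        exact this
      rw [hseg, pal_cons_concat, hga, hgb]
      by_cases heq : (w[l.toNat]'(by omega)) = (w[r.toNat]'hb)
      · have ihr := ih (l + 1) (r - 1) (by omega) (by omega) (by omega)
        rw [show ((l : Int) + 1).toNat = l.toNat + 1 by omega,
            show ((r : Int) - 1 + 1 - (l + 1)).toNat = r.toNat - 1 - l.toNat by omega] at ihr
        rw [if_neg (by simp [heq]), ihr]
        tauto
      · rw [if_pos (by simp [heq])]
        simp only [Bool.false_eq_true, false_iff, not_and]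
        intro h; exact absurd h heq
    · rw [palLoopA]
      simp only [hlr, if_false]
      have h1 : (r + 1 - l).toNat ≤ 1 := by omega
      rcases Nat.le_one_iff_eq_zero_or_eq_one.mp h1 with h | h <;> rw [h]
      · simp
      · cases hd : w.drop l.toNat <;> simp

-- ---- the exact-rolling-hash machinery ----

-- little-endian evaluation of a digit list
def evalLE (b : Int) : List Int → Int
  | [] => 0
  | d :: ds => d + b * evalLE b ds

theorem evalLE_append_singleton (b d : Int) (l : List Int) :
    evalLE b (l ++ [d]) = evalLE b l + d * b ^ l.length := by
  induction l with
  | nil => simp [evalLE]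
  | cons x xs ih => simp [evalLE, ih]; ring

theorem evalLE_inj (b : Int) : ∀ (l1 l2 : List Int), l1.length = l2.length →
    (∀ d ∈ l1, 0 ≤ d ∧ d < b) → (∀ d ∈ l2, 0 ≤ d ∧ d < b) →
    evalLE b l1 = evalLE b l2 → l1 = l2 := by
  intro l1
  induction l1 with
  | nil => intro l2 hlen _ _ _; exact (List.length_eq_zero_iff.mp hlen.symm).symm
  | cons d1 t1 ih =>
    intro l2 hlen h1 h2 hev
    cases l2 with
    | nil => simp at hlen
    | cons d2 t2 =>
      have hd1 := h1 d1 (by simp)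
      have hd2 := h2 d2 (by simp)
      have hb : 0 < b := by omega
      simp only [evalLE] at hev
      have hk : d1 - d2 = b * (evalLE b t2 - evalLE b t1) := by ring_nf; linarith
      set k := evalLE b t2 - evalLE b t1 with hkdef
      have hk1 : k < 1 := by nlinarith
      have hk2 : -1 < k := by nlinarith
      have hk0 : k = 0 := by omega
      have hd : d1 = d2 := by
        have h0 : d1 - d2 = 0 := by rw [hk, hk0, mul_zero]
        omega
      have ht : t1 = t2 := ih t2 (by simpa using hlen)
        (fun d hd => h1 d (by simp [hd])) (fun d hd => h2 d (by simp [hd]))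
        (by omega)
      rw [hd, ht]

-- powsB values
theorem powsB_getElem? (b : Int) : ∀ (m i : Nat), i ≤ m → (powsB b m)[i]? = some (b ^ i) := by
  intro m
  induction m with
  | zero => intro i hi; interval_cases i; simp [powsB]
  | succ k ih =>
    intro i hi
    have hlen : (powsB b k).length = k + 1 := by
      clear ih hi
      induction k with
      | zero => simp [powsB]
      | succ j ihj => simp [powsB, ihj]
    rcases Nat.lt_or_ge i (k + 1) with h | h
    · rw [powsB]
      simp only [List.getElem?_append_left (by omega : i < (powsB b k).length)]
      exact ih i (by omega)
    · have hik : i = k + 1 := by omega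
      subst hik
      rw [powsB]
      simp only [List.getElem?_append_right (by omega : (powsB b k).length ≤ k + 1), hlen]
      simp only [Nat.sub_self, List.getElem?_cons_zero]
      have hlast : (powsB b k).getLastD 1 = b ^ k := by
        have h1 : (powsB b k).getLastD 1 = ((powsB b k)[k]?).getD 1 := by
          rw [List.getLastD_eq_getLast?, List.getLast?_eq_getElem?, hlen]
          simp
        rw [h1, ih k (le_refl k)]
        rfl
      rw [hlast, ← pow_succ]

theorem powsB_getD (b : Int) (m i : Nat) (d : Int) (hi : i ≤ m) :
    (powsB b m).getD i d = b ^ i := by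
  rw [List.getD_eq_getElem?_getD, powsB_getElem? b m i hi]
  rfl

-- S and R in closed form
theorem sValB_eq (b : Int) (code : List Int) (m : Nat) (hc : code.length = m) :
    ∀ a, a ≤ m → sValB code (powsB b m) m a = b ^ a * evalLE b (code.drop a) := by
  intro a
  induction' hn : m - a with k ih generalizing a
  · intro ha
    have hdrop : code.drop a = ([] : List Int) := List.drop_of_length_le (by omega)
    rw [sValB, if_neg (by omega), hdrop]
    simp [evalLE]
  · intro ha
    have ham : a < m := by omega
    rw [sValB]
    simp only [ham, if_pos]
    rw [ih (a + 1) (by omega) (by omega)]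
    have hget : code.getD a 0 = code[a]'(by omega) := by
      rw [List.getD_eq_getElem?_getD, List.getElem?_eq_getElem (by omega)]; rfl
    rw [powsB_getD b m a 0 (by omega), hget,
        show code.drop a = code[a]'(by omega) :: code.drop (a + 1) from
          (List.getElem_cons_drop (as := code) (h := by omega)).symm]
    simp [evalLE]
    ring

theorem rValB_eq (b : Int) (code : List Int) (m : Nat) (hc : code.length = m) :
    ∀ a, a ≤ m → rValB code (powsB b m) m a = evalLE b ((code.drop a).reverse) := by
  intro a
  induction' hn : m - a with k ih generalizing a
  · intro ha
    have hdrop : code.drop a = ([] : List Int) := List.drop_of_length_le (by omega)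
    rw [rValB, if_neg (by omega), hdrop]
    simp [evalLE]
  · intro ha
    have ham : a < m := by omega
    rw [rValB]
    simp only [ham, if_pos]
    rw [ih (a + 1) (by omega) (by omega)]
    have hget : code.getD a 0 = code[a]'(by omega) := by
      rw [List.getD_eq_getElem?_getD, List.getElem?_eq_getElem (by omega)]; rfl
    rw [powsB_getD b m (m - 1 - a) 0 (by omega), hget,
        show code.drop a = code[a]'(by omega) :: code.drop (a + 1) from
          (List.getElem_cons_drop (as := code) (h := by omega)).symm]
    rw [List.reverse_cons, evalLE_append_singleton]
    have hlenrev : ((code.drop (a + 1)).reverse).length = m - 1 - a := by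
      simp [hc]; omega
    rw [hlenrev]

-- the first-occurrence encoding
def encB (t : List (String × Int)) (w : String × Int) : Int :=
  (((PySem.List.index? t w).getD 0 : Nat) : Int)

theorem encB_spec (t : List (String × Int)) (w : String × Int) (hw : w ∈ t) :
    ∃ hk : ((PySem.List.index? t w).getD 0 : Nat) < t.length,
      t[((PySem.List.index? t w).getD 0 : Nat)]'hk = w := by
  obtain ⟨k, hk⟩ := Option.isSome_iff_exists.mp ((PySem.List.index?_isSome_iff t w).mpr hw)
  obtain ⟨hlt, heq, _⟩ := PySem.List.getElem_of_index?_eq_some hk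
  rw [hk]
  exact ⟨hlt, heq⟩

theorem encB_inj (t : List (String × Int)) (x y : String × Int) (hx : x ∈ t) (hy : y ∈ t)
    (h : encB t x = encB t y) : x = y := by
  obtain ⟨hkx, hex⟩ := encB_spec t x hx
  obtain ⟨hky, hey⟩ := encB_spec t y hy
  unfold encB at h
  have : ((PySem.List.index? t x).getD 0 : Nat) = ((PySem.List.index? t y).getD 0 : Nat) := by
    exact_mod_cast h
  rw [← hex, ← hey]
  congr 1

theorem encB_bound (t : List (String × Int)) (w : String × Int) (hw : w ∈ t) :
    0 ≤ encB t w ∧ encB t w < (t.length : Int) := by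
  obtain ⟨hk, _⟩ := encB_spec t w hw
  unfold encB
  constructor
  · positivity
  · exact_mod_cast hk

theorem map_encB_inj (t : List (String × Int)) : ∀ (u v : List (String × Int)),
    (∀ x ∈ u, x ∈ t) → (∀ x ∈ v, x ∈ t) → u.map (encB t) = v.map (encB t) → u = v := by
  intro u
  induction u with
  | nil =>
    intro v _ _ h
    cases v with
    | nil => rfl
    | cons y ys => simp at h
  | cons x xs ih =>
    intro v hu hv h
    cases v with
    | nil => simp at h
    | cons y ys =>
      simp only [List.map_cons, List.cons.injEq] at h
      have hxy := encB_inj t x y (hu x (by simp)) (hv y (by simp)) h.1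
      rw [hxy, ih ys (fun z hz => hu z (by simp [hz])) (fun z hz => hv z (by simp [hz])) h.2]

-- the hash test decides palindromicity of t.drop a exactly
theorem hash_test_iff (t : List (String × Int)) (m a : Nat) (ht : t.length = m) (ha : a ≤ m) :
    (sValB (t.map (encB t)) (powsB ((m : Int) + 1) m) m a
        = rValB (t.map (encB t)) (powsB ((m : Int) + 1) m) m a
            * (powsB ((m : Int) + 1) m).getD a 0)
      ↔ (t.drop a).reverse = t.drop a := by
  set b : Int := (m : Int) + 1 with hb
  set code := t.map (encB t) with hcode
  have hc : code.length = m := by simp [hcode, ht]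
  have hbpos : (0 : Int) < b ^ a := by positivity
  rw [sValB_eq b code m hc a ha, rValB_eq b code m hc a ha, powsB_getD b m a 0 ha]
  have hdig : ∀ d ∈ code.drop a, 0 ≤ d ∧ d < b := by
    intro d hd
    have hd' : d ∈ code := List.mem_of_mem_drop hd
    obtain ⟨x, hx, rfl⟩ := List.mem_map.mp hd'
    have hbd := encB_bound t x hx
    rw [ht] at hbd
    rw [hb]
    omega
  constructor
  · intro h
    have hev : evalLE b (code.drop a) = evalLE b ((code.drop a).reverse) := by
      have h' : b ^ a * evalLE b (code.drop a) = b ^ a * evalLE b ((code.drop a).reverse) := by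
        linarith [h]
      exact mul_left_cancel₀ (by positivity) h'
    have hlists : code.drop a = (code.drop a).reverse :=
      evalLE_inj b _ _ (by simp) hdig (fun d hd => hdig d (List.mem_reverse.mp hd)) hev
    rw [hcode] at hlists
    have hmap : (t.drop a).map (encB t) = ((t.drop a).reverse).map (encB t) := by
      rw [List.map_reverse, List.map_drop]
      exact hlists
    have := map_encB_inj t (t.drop a) ((t.drop a).reverse)
      (fun x hx => List.mem_of_mem_drop hx)
      (fun x hx => List.mem_of_mem_drop (List.mem_reverse.mp hx)) hmap
    exact this.symm
  · intro h
    have hmap : code.drop a = (code.drop a).reverse := by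
      rw [hcode, ← List.map_drop, ← List.map_reverse, h]
    rw [← hmap]
    ring

-- the yields of one iteration of B's loop (generic in the precomputed data)
def gB (w t' : List (String × Int)) (code pows : List Int) (m' : Nat)
    (lc : String) (lk : Int) (index : Int) : List (List (String × Int)) :=
  let word := PySem.List.pyGetD w index ("", 0)
  if word.1 = lc ∧ word.2 ≥ lk then
    if sValB code pows m' (index.toNat + 1)
        = rValB code pows m' (index.toNat + 1) * pows.getD (index.toNat + 1) 0 then
      if word.2 = lk then [PySem.List.slice t' none (some index)]
      else [PySem.List.slice t' none (some index) ++ [(word.1, word.2 - lk)]]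
    else []
  else []

-- pointwise agreement of the two loop bodies on indices 0 ≤ j < n-1
theorem body_eq (w t' : List (String × Int)) (code pows : List Int) (m' : Nat)
    (lc : String) (lk : Int)
    (hget : PySem.List.pyGet? w (-1) = some (lc, lk))
    (hm' : m' = w.length - 1)
    (ht' : t' = w.take m')
    (hcode : code = t'.map (encB t'))
    (hpows : pows = powsB ((m' : Int) + 1) m')
    (j : Int) (hj : 0 ≤ j) (hj2 : j < (w.length : Int) - 1) :
    bodyA w j (PySem.List.pyGetD w j ("", 0)) = gB w t' code pows m' lc lk j := by
  have hlen : 2 ≤ w.length := by omega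
  have hj3 : j.toNat < w.length := by omega
  have hword : PySem.List.pyGetD w j ("", 0) = w[j.toNat] :=
    PySem.List.pyGetD_eq_getElem w ("", 0) hj (by omega)
  subst hm' ht' hcode hpows
  set m' : Nat := w.length - 1 with hm
  set t' := w.take m' with ht
  have htlen : t'.length = m' := by rw [ht]; simp; omega
  -- B's sliced prefix equals A's
  have hsliceidx : PySem.List.slice t' none (some j) = PySem.List.slice w none (some j) := by
    rw [PySem.List.slice_to t' hj, PySem.List.slice_to w hj, ht, List.take_take]
    congr 1
    omega
  -- t'.drop (j+1) is A's middle segment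
  have hdrop : t'.drop (j.toNat + 1)
      = (w.drop (j.toNat + 1)).take (w.length - 1 - (j.toNat + 1)) := by
    rw [ht, List.drop_take]
  -- A's palindrome test = palindromicity of that segment
  have hpal : (isPalindromeA w (j + 1) ((w.length : Int) - 1) = true) ↔
      (((w.drop (j.toNat + 1)).take (w.length - 1 - (j.toNat + 1))).reverse
        = (w.drop (j.toNat + 1)).take (w.length - 1 - (j.toNat + 1))) := by
    unfold isPalindromeA
    have := pal_correct_aux w ((w.length : Int) - 1 - 1 - (j + 1)).toNat (j + 1)
      ((w.length : Int) - 1 - 1) (by omega) (by omega) (by omega)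
    rw [this]
    rw [show ((w.length : Int) - 1 - 1 + 1 - (j + 1)).toNat = w.length - 1 - (j.toNat + 1) by omega,
        show ((j : Int) + 1).toNat = j.toNat + 1 by omega]
  -- B's hash test = the same palindromicity
  have hhash : (sValB (t'.map (encB t')) (powsB ((m' : Int) + 1) m') m' (j.toNat + 1)
        = rValB (t'.map (encB t')) (powsB ((m' : Int) + 1) m') m' (j.toNat + 1)
            * (powsB ((m' : Int) + 1) m').getD (j.toNat + 1) 0)
      ↔ (((w.drop (j.toNat + 1)).take (w.length - 1 - (j.toNat + 1))).reverse
          = (w.drop (j.toNat + 1)).take (w.length - 1 - (j.toNat + 1))) := by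
    rw [hash_test_iff t' m' (j.toNat + 1) htlen (by omega), hdrop]
  unfold bodyA gB
  rw [hget, hword]
  simp only
  by_cases hc : w[j.toNat].1 = lc ∧ w[j.toNat].2 ≥ lk
  · rw [if_neg (by simp only [ne_eq, not_or, not_lt, Decidable.not_not]; exact ⟨hc.1, hc.2⟩),
        if_pos hc, if_neg (show ¬ j = (w.length : Int) - 1 by omega)]
    by_cases hp : ((w.drop (j.toNat + 1)).take (w.length - 1 - (j.toNat + 1))).reverse
        = (w.drop (j.toNat + 1)).take (w.length - 1 - (j.toNat + 1))
    · rw [if_neg (by simp [hpal.mpr hp]), if_pos (hhash.mpr hp), hsliceidx]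
    · rw [if_pos (by simpa [hpal] using hp), if_neg (fun h => hp (hhash.mp h))]
  · rw [if_pos (by rcases not_and_or.mp hc with h | h
                   · exact Or.inl h
                   · exact Or.inr (by omega)),
        if_neg hc]

-- B's loop body, rewritten in 'acc ++ emission' shape
theorem stepB_shape (w t' : List (String × Int)) (code pows : List Int) (m' : Nat)
    (lc : String) (lk : Int) :
    (fun (acc : List (List (String × Int))) (index : Int) =>
      if (PySem.List.pyGetD w index ("", 0)).1 = lc ∧ (PySem.List.pyGetD w index ("", 0)).2 ≥ lk then
        if sValB code pows m' (index.toNat + 1)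
            = rValB code pows m' (index.toNat + 1) * pows.getD (index.toNat + 1) 0 then
          if (PySem.List.pyGetD w index ("", 0)).2 = lk then
            acc ++ [PySem.List.slice t' none (some index)]
          else acc ++ [PySem.List.slice t' none (some index)
            ++ [((PySem.List.pyGetD w index ("", 0)).1, (PySem.List.pyGetD w index ("", 0)).2 - lk)]]
        else acc
      else acc)
    = (fun acc index => acc ++ gB w t' code pows m' lc lk index) := by
  funext acc index
  simp only [gB]
  split_ifs <;> simp

theorem lastBody_eq (w : List (String × Int)) (lc : String) (lk : Int)
    (hw : w ≠ []) (hlast : w.getLast hw = (lc, lk))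
    (hget : PySem.List.pyGet? w (-1) = some (lc, lk)) :
    bodyA w ((w.length : Int) - 1) (PySem.List.pyGetD w ((w.length : Int) - 1) ("", 0)) =
      [PySem.List.slice w none (some ((w.length : Int) - 1))] ++
        (PySem.List.pyRange 1 lk 1).map
          (fun c => PySem.List.slice w none (some ((w.length : Int) - 1)) ++ [(lc, c)]) := by
  have hlen : 1 ≤ w.length := List.length_pos_iff.mpr hw
  have hword : PySem.List.pyGetD w ((w.length : Int) - 1) ("", 0) = (lc, lk) := by
    rw [PySem.List.pyGetD_eq_getElem w ("", 0) (by omega) (by omega)]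
    simp only [show ((w.length : Int) - 1).toNat = w.length - 1 from by omega]
    rw [← List.getLast_eq_getElem hw, hlast]
  have hslice : PySem.List.slice w none (some (-1)) =
      PySem.List.slice w none (some ((w.length : Int) - 1)) := by
    rw [PySem.List.slice_to_neg_one, PySem.List.slice_to w (by omega),
        show ((w.length : Int) - 1).toNat = w.length - 1 by omega, List.dropLast_eq_take]
  unfold bodyA
  rw [hget, hword]
  simp only
  rw [if_neg (by simp)]
  simp only [if_true]
  rw [hslice]

theorem ports_eq (w : List (String × Int)) :
    getPrefixBeforePalindromes w = getPrefixBeforePalindromes_alt w := by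
  rcases eq_or_ne w [] with rfl | hw
  · rfl
  · have hlen : 1 ≤ w.length := List.length_pos_iff.mpr hw
    have hget : PySem.List.pyGet? w (-1) = some (w.getLast hw) := by
      rw [PySem.List.pyGet?_neg_one, List.getLast?_eq_getLast_of_ne_nil hw]
    set lc := (w.getLast hw).1 with hlc
    set lk := (w.getLast hw).2 with hlk
    have hlast : w.getLast hw = (lc, lk) := rfl
    rw [hlast] at hget
    -- left side: fold over enumerate = flatMap of bodyA over range 0..n
    unfold getPrefixBeforePalindromes
    rw [PySem.List.foldl_append_eq_flatMap, PySem.List.enumerate_eq_map_pyRange w ("", 0),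
        List.flatMap_map]
    have hsplit : PySem.List.pyRange 0 (PySem.List.len w) 1 =
        PySem.List.pyRange 0 ((w.length : Int) - 1) 1 ++ [(w.length : Int) - 1] := by
      have h0 : (PySem.List.len w) = ((w.length : Int) - 1) + 1 := by
        simp [PySem.List.len_eq]
      rw [h0, PySem.List.pyRange_one_succ_right (by omega)]
    rw [hsplit, List.flatMap_append]
    -- right side
    unfold getPrefixBeforePalindromes_alt
    simp only
    rw [if_neg (by simpa using hw), hget]
    simp only
    rw [show ((w.length - 1 : Nat) : Int) = (w.length : Int) - 1 by omega]
    rw [stepB_shape, PySem.List.foldl_append_eq_flatMap]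
    have hbody : ∀ j ∈ PySem.List.pyRange 0 ((w.length : Int) - 1) 1,
        bodyA w j (PySem.List.pyGetD w j ("", 0))
          = gB w (PySem.List.slice w none (some ((w.length : Int) - 1)))
              ((PySem.List.slice w none (some ((w.length : Int) - 1))).map
                (fun x => (((PySem.List.index? (PySem.List.slice w none (some ((w.length : Int) - 1))) x).getD 0 : Nat) : Int)))
              (powsB (w.length : Int) (w.length - 1)) (w.length - 1) lc lk j := by
      intro j hj
      have hmem := (PySem.List.mem_pyRange_one).mp hj
      exact body_eq w _ _ _ _ lc lk hget rfl
        (by rw [PySem.List.slice_to w (by omega)]; congr 1; omega)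
        rfl
        (by congr 1; omega)
        j hmem.1 hmem.2
    rw [List.flatMap_congr hbody]
    rw [show List.flatMap (fun j => bodyA w j (PySem.List.pyGetD w j ("", 0)))
          [(w.length : Int) - 1]
        = bodyA w ((w.length : Int) - 1)
            (PySem.List.pyGetD w ((w.length : Int) - 1) ("", 0)) by
      simp]
    rw [lastBody_eq w lc lk hw hlast hget]
    simp [List.append_assoc]


-- ===== VERDICT (by name: the statement is the Claim_ definition above) =====
theorem getPrefixBeforePalindromes_spec : Claim_equal_getPrefixBeforePalindromes := by
  intro w _
  unfold Spec_getPrefixBeforePalindromes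
  exact ports_eq w
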